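-- pv_equiv track=rewrite | github.com/honghanhh/templateNER | utils.py | get_entities_span
-- ===== SOURCE A (Python) =====
-- def get_entities_span(starts, ends):
--     if any(isinstance(s, list) for s in starts):
--         starts = [item for sublist in starts for item in sublist + ['<SEP>']]
--     if any(isinstance(s, list) for s in ends):
--         ends = [item for sublist in ends for item in sublist + ['<SEP>']]
--     chunks = []
--     for start_index, start in enumerate(starts):
--         if start in ['O', '<SEP>']:
--             continue
--         for end_index, end in enumerate(ends[start_index:]):
--             if start == end:
--                 chunks.append((start, start_index, start_index + end_index))
--                 break
--             elif end == '<SEP>':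
--                 break
--     return set(chunks)
-- ===== SOURCE B (Python) =====
-- def get_entities_span(starts, ends):
--     if any(isinstance(s, list) for s in starts):
--         starts = [item for sublist in starts for item in sublist + ['<SEP>']]
--     if any(isinstance(s, list) for s in ends):
--         ends = [item for sublist in ends for item in sublist + ['<SEP>']]
--     # Pass 1 (right to left over ends): nearest[label] = first position >= i
--     # holding label, with no '<SEP>' in between; cleared at each '<SEP>'.
--     nearest = {}
--     rev = []
--     for i in range(len(ends) - 1, -1, -1):
--         e = ends[i]
--         if e == '<SEP>':
--             nearest = {}
--         else:
--             nearest[e] = i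
--         if i < len(starts):
--             rev.append(nearest.get(starts[i]))
--     match = rev[::-1] + [None] * max(0, len(starts) - len(ends))
--     # Pass 2: emit one chunk per matched start.
--     chunks = []
--     for i, s in enumerate(starts):
--         if s in ('O', '<SEP>'):
--             continue
--         j = match[i]
--         if j is not None:
--             chunks.append((s, i, j))
--     return set(chunks)
-- ===== Notes on version B (the rewrite author's own statement) =====
-- stated objective: faster
-- what changed: Replaces A's per-start forward scan over ends (quadratic) by a single right-to-left pass over ends that maintains a nearest-match dictionary reset at each '<SEP>', then a linear pass over starts emitting the chunks.
import Mathlib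
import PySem

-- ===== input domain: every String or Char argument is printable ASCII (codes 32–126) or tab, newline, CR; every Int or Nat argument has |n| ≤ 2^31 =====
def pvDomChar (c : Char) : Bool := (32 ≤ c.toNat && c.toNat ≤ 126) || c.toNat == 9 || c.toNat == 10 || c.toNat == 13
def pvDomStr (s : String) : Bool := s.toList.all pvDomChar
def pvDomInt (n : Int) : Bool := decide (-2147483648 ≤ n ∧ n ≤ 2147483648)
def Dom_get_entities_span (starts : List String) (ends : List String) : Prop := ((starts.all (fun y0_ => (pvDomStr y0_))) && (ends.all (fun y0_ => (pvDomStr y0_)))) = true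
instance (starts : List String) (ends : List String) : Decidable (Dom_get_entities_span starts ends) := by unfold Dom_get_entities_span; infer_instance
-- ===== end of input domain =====

-- B replaces A's quadratic forward scan per start by one right-to-left pass over
-- `ends` maintaining a nearest-match dictionary (reset at '<SEP>'); same return value.

-- ===== PORT A =====
-- inner loop of A: first offset k with ends'[k] = s (some k), stopping at '<SEP>' (none)
def pvScanA (s : String) : List String → Option Nat
  | [] => none
  | e :: rest =>
    if s = e then some 0
    else if e = "<SEP>" then none
    else (pvScanA s rest).map (· + 1)

-- the 'isinstance(s, list)' flatten branches can never fire for List String inputs, so they are omitted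
def get_entities_span (starts : List String) (ends : List String) : List (String × Int × Int) :=
  let chunks := (PySem.List.enumerate starts 0).foldl (fun acc p =>
    if p.2 = "O" ∨ p.2 = "<SEP>" then acc
    else
      -- ends[start_index:] with p.1 = start_index ≥ 0 is List.drop
      match pvScanA p.2 (ends.drop p.1.toNat) with
      | some k => acc ++ [(p.2, p.1, p.1 + (k : Int))]
      | none => acc) []
  PySem.Set.ofList chunks

-- ===== PORT B =====
-- loop body of B's pass 1 (i ranges over len(ends)-1 … 0, so ends[i]/starts[i] are in range)
def pvStep (starts ends : List String) (st : PySem.Dict String Int × List (Option Int)) (i : Int) :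
    PySem.Dict String Int × List (Option Int) :=
  let e := PySem.List.pyGetD ends i ""
  let nearest := if e = "<SEP>" then PySem.Dict.empty else st.1.insert e i
  let rev := if i < (starts.length : Int) then
      st.2 ++ [nearest.get? (PySem.List.pyGetD starts i "")]
    else st.2
  (nearest, rev)

def get_entities_span_alt (starts : List String) (ends : List String) : List (String × Int × Int) :=
  let st := (PySem.List.pyRange ((ends.length : Int) - 1) (-1) (-1)).foldl (pvStep starts ends)
    (PySem.Dict.empty, [])
  let matchL := st.2.reverse ++ List.replicate (starts.length - ends.length) none
  let chunks := (PySem.List.enumerate starts 0).foldl (fun acc p =>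
    if p.2 = "O" ∨ p.2 = "<SEP>" then acc
    else
      -- match[i]: index p.1 is always in range of matchL (|matchL| = |starts|), so getD is exact
      match PySem.List.pyGetD matchL p.1 none with
      | some j => acc ++ [(p.2, p.1, j)]
      | none => acc) []
  PySem.Set.ofList chunks

-- ===== PRECONDITION & SPEC =====
def Spec_get_entities_span (starts : List String) (ends : List String) (out : List (String × Int × Int)) : Prop := out = get_entities_span_alt starts ends
instance (starts : List String) (ends : List String) (out : List (String × Int × Int)) : Decidable (Spec_get_entities_span starts ends out) := by unfold Spec_get_entities_span; infer_instance

-- ===== CLAIM (what is proved, stated in full; the proofs are below) =====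
def Claim_equal_get_entities_span : Prop := ∀ (starts : List String) (ends : List String), Dom_get_entities_span starts ends → Spec_get_entities_span starts ends (get_entities_span starts ends)

-- ===== LEMMAS AND PROOFS =====

-- the value B's dictionary holds for label s after processing suffix ends[j:]
def pvSpec (s : String) (ends : List String) (j : Nat) : Option Int :=
  if s = "<SEP>" then none else (pvScanA s (ends.drop j)).map (fun k => ((j : Int) + k))

theorem pvStep_rep (starts ends : List String) (j : Nat) (hj : j < ends.length)
    (d : PySem.Dict String Int) (rev : List (Option Int))
    (hd : ∀ s, d.get? s = pvSpec s ends (j + 1)) :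
    ∀ s, (pvStep starts ends (d, rev) (j : Int)).1.get? s = pvSpec s ends j := by
  intro s
  have hdrop : ends.drop j = ends[j] :: ends.drop (j + 1) := List.drop_eq_getElem_cons hj
  have hget : PySem.List.pyGetD ends (j : Int) "" = ends[j] := by
    rw [PySem.List.pyGetD_natCast]
    exact List.getD_eq_getElem ends "" hj
  simp only [pvStep, hget]
  by_cases he : ends[j] = "<SEP>"
  · simp only [he, pvSpec, hdrop, pvScanA]
    by_cases hsep : s = "<SEP>" <;> simp [hsep, PySem.Dict.get?_empty]
  · simp only [if_neg he, PySem.Dict.get?_insert]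
    by_cases hs : s = ends[j]
    · simp only [pvSpec, hs, he, hdrop, pvScanA]
      simp
    · rw [if_neg hs, hd s]
      by_cases hsep : s = "<SEP>"
      · simp [pvSpec, hsep]
      · simp only [pvSpec, if_neg hsep, hdrop, pvScanA, if_neg (by exact fun h => hs h), if_neg he]
        cases pvScanA s (ends.drop (j + 1)) <;> simp <;> ring

theorem pvStep_rev (starts ends : List String) (j : Nat) (hj : j < ends.length)
    (d : PySem.Dict String Int) (rev : List (Option Int))
    (hd : ∀ s, d.get? s = pvSpec s ends (j + 1)) :
    (pvStep starts ends (d, rev) (j : Int)).2 =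
      if j < starts.length then rev ++ [pvSpec (starts.getD j "") ends j] else rev := by
  have hrep := pvStep_rep starts ends j hj d rev hd (starts.getD j "")
  simp only [pvStep] at hrep ⊢
  rw [PySem.List.pyGetD_natCast starts]
  by_cases h : j < starts.length
  · rw [if_pos (by exact_mod_cast h), if_pos h, hrep]
  · rw [if_neg (by exact_mod_cast h), if_neg h]

theorem pass1_rev (starts ends : List String) : ∀ (i : Nat), i ≤ ends.length →
    ∀ (d : PySem.Dict String Int) (rev : List (Option Int)),
    (∀ s, d.get? s = pvSpec s ends i) →
    ((PySem.List.pyRange ((i : Int) - 1) (-1) (-1)).foldl (pvStep starts ends) (d, rev)).2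
      = rev ++ ((List.range (min i starts.length)).map
          (fun j => pvSpec (starts.getD j "") ends j)).reverse := by
  intro i
  induction i with
  | zero =>
    intro _ d rev hd
    rw [PySem.List.pyRange_neg_one_eq_nil (by norm_num)]
    simp
  | succ i ih =>
    intro h d rev hd
    have hj : i < ends.length := by omega
    have e1 : (((i + 1 : Nat)) : Int) - 1 = (i : Int) := by push_cast; ring
    rw [e1, PySem.List.pyRange_neg_one_cons (by omega)]
    rw [List.foldl_cons]
    have hrep := pvStep_rep starts ends i hj d rev hd
    have hrev := pvStep_rev starts ends i hj d rev hd
    have hmain := ih (by omega) (pvStep starts ends (d, rev) (i : Int)).1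
      (pvStep starts ends (d, rev) (i : Int)).2 hrep
    rw [show (pvStep starts ends (d, rev) (i : Int)) =
      ((pvStep starts ends (d, rev) (i : Int)).1, (pvStep starts ends (d, rev) (i : Int)).2) from rfl]
    rw [hmain, hrev]
    by_cases hS : i < starts.length
    · rw [if_pos hS]
      have hmi : min i starts.length = i := by omega
      have hmi1 : min (i + 1) starts.length = i + 1 := by omega
      rw [hmi, hmi1, List.range_succ]
      simp
    · rw [if_neg hS]
      have : min (i + 1) starts.length = min i starts.length := by omega
      rw [this]

theorem matchL_spec (starts ends : List String) (j : Nat) (hj : j < starts.length) :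
    PySem.List.pyGetD
      ((((PySem.List.pyRange ((ends.length : Int) - 1) (-1) (-1)).foldl (pvStep starts ends)
          (PySem.Dict.empty, [])).2).reverse ++ List.replicate (starts.length - ends.length) none)
      (j : Int) none
      = pvSpec (starts.getD j "") ends j := by
  have hrep : ∀ s, (PySem.Dict.empty : PySem.Dict String Int).get? s = pvSpec s ends ends.length := by
    intro s
    simp [pvSpec, PySem.Dict.get?_empty, List.drop_length, pvScanA]
  have h1 := pass1_rev starts ends ends.length le_rfl PySem.Dict.empty [] hrep
  rw [PySem.List.pyGetD_natCast, h1]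
  simp only [List.nil_append, List.reverse_reverse]
  by_cases hn : j < ends.length
  · have hjm : j < min ends.length starts.length := by omega
    rw [List.getD_eq_getElem?_getD, List.getElem?_append_left (by simpa using hjm)]
    simp [hjm]
  · have hjn : ends.length ≤ j := by omega
    have hmin : min ends.length starts.length = ends.length := by omega
    rw [List.getD_eq_getElem?_getD, List.getElem?_append_right (by simp [hmin]; omega)]
    rw [List.getElem?_replicate]
    have : ends.drop j = [] := List.drop_eq_nil_of_le hjn
    simp [pvSpec, this, pvScanA, hmin]
    split <;> rfl

-- ===== VERDICT (by name: the statement is the Claim_ definition above) =====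
theorem get_entities_span_spec : Claim_equal_get_entities_span := by
  intro starts ends _
  unfold Spec_get_entities_span get_entities_span get_entities_span_alt
  refine congrArg PySem.Set.ofList (PySem.List.foldl_congr_mem _ _ _ _ ?_)
  intro acc p hp
  rcases (PySem.List.mem_enumerate_iff starts 0 p).mp hp with ⟨k, hk, rfl⟩
  by_cases hsk : starts[k] = "O" ∨ starts[k] = "<SEP>"
  · simp [hsk]
  · simp only [if_neg hsk]
    have e0 : ((0 : Int) + (k : Int)) = (k : Int) := by ring
    have hms := matchL_spec starts ends k hk
    have hgetD : starts.getD k "" = starts[k] := List.getD_eq_getElem starts "" hk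
    rw [e0, hms, hgetD]
    have hsep : ¬ starts[k] = "<SEP>" := fun h => hsk (Or.inr h)
    rw [pvSpec, if_neg hsep]
    have ht : ((k : Int)).toNat = k := Int.toNat_natCast k
    rw [ht]
    cases pvScanA starts[k] (ends.drop k) <;> simp
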